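-- pv_equiv track=rewrite | github.com/kimjune01/june.kim | worklog/h14_v2.py | is_fully_reachable
-- ===== SOURCE A (Python) =====
-- from collections import defaultdict
-- import heapq
--
-- def build_adj(edges):
--     adj = defaultdict(list)
--     for (a, b, t) in edges:
--         adj[a].append((b, t))
--         adj[b].append((a, t))
--     return adj
--
-- def temporal_reach_from(source, adj, depart_time=-1):
--     """BFS/Dijkstra from source, edges must have timestamp >= depart_time."""
--     best = {source: depart_time}
--     queue = [(depart_time, source)]
--     while queue:
--         t_arr, u = heapq.heappop(queue)
--         if t_arr > best.get(u, float('inf')):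
--             continue
--         for (v, t_edge) in adj[u]:
--             if t_edge >= t_arr:
--                 if t_edge < best.get(v, float('inf')):
--                     best[v] = t_edge
--                     heapq.heappush(queue, (t_edge, v))
--     return best
--
-- def is_fully_reachable(k, edges):
--     adj = build_adj(edges)
--     n = 2 * k
--     for s in range(n):
--         r = temporal_reach_from(s, adj)
--         if len(r) < n:
--             return False
--     return True
-- ===== SOURCE B (Python) =====
-- def is_fully_reachable(k, edges):
--     # Bellman-Ford-style: per source, repeat full relaxation passes over the
--     # raw edge list (both directions) until the earliest-arrival map is stable.
--     n = 2 * k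
--     for s in range(n):
--         best = {s: -1}
--         changed = True
--         while changed:
--             changed = False
--             for (a, b, t) in edges:
--                 ba = best.get(a)
--                 if ba is not None and ba <= t and (b not in best or t < best[b]):
--                     best[b] = t
--                     changed = True
--                 bb = best.get(b)
--                 if bb is not None and bb <= t and (a not in best or t < best[a]):
--                     best[a] = t
--                     changed = True
--         if len(best) < n:
--             return False
--     return True
-- ===== Notes on version B (the rewrite author's own statement) =====
-- stated objective: alternative
-- what changed: A runs a heap-based temporal Dijkstra per source over a prebuilt adjacency dict; B drops the heap and the adjacency build entirely and instead repeats Bellman-Ford-style full relaxation passes over the raw edge list (both directions) until the earliest-arrival map is stable, then compares the same reachable-set size.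
import Mathlib
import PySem

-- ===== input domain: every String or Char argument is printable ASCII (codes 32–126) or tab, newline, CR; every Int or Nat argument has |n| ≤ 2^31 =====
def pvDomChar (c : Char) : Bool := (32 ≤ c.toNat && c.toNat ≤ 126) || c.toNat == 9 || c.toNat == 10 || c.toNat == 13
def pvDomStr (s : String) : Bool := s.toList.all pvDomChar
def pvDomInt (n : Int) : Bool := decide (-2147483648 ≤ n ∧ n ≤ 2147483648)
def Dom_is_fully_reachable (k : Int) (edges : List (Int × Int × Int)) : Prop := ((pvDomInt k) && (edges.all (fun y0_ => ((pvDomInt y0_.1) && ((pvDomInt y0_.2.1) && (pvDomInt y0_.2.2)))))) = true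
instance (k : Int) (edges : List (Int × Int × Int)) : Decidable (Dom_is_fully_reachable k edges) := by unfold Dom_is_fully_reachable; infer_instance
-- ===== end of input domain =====

-- B replaces A's per-source heap Dijkstra over a prebuilt adjacency dict with
-- per-source repeated full relaxation passes over the raw edge list until the
-- earliest-arrival map is stable (objective: alternative, not claimed faster).

-- ===== PORT A =====
-- build_adj: defaultdict(list) with both edge directions appended in order.
def pvBuildAdj (edges : List (Int × Int × Int)) : PySem.Dict Int (List (Int × Int)) :=
  edges.foldl (fun d e =>
    let d1 := d.insert e.1 (d.getD e.1 [] ++ [(e.2.1, e.2.2)])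
    d1.insert e.2.1 (d1.getD e.2.1 [] ++ [(e.1, e.2.2)])) PySem.Dict.empty

-- heapq model: the queue is the multiset of pushed (time, node) pairs and
-- heappop returns the lexicographically smallest pair — exact, since Python
-- compares int tuples lexicographically and equal tuples are indistinguishable.
def pvLexLe (x y : Int × Int) : Bool := decide (x.1 < y.1 ∨ (x.1 = y.1 ∧ x.2 ≤ y.2))

def pvPopMin : List (Int × Int) → Option ((Int × Int) × List (Int × Int))
  | [] => none
  | x :: xs =>
    match pvPopMin xs with
    | none => some (x, [])
    | some (m, r) => if pvLexLe x m then some (x, xs) else some (m, x :: r)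

-- body of 'for (v, t_edge) in adj[u]' (t_arr is the popped arrival time)
def pvStepA (tarr : Int) (bq : PySem.Dict Int Int × List (Int × Int)) (vt : Int × Int) :
    PySem.Dict Int Int × List (Int × Int) :=
  if vt.2 ≥ tarr then
    match bq.1.get? vt.1 with
    | some bv => if vt.2 < bv then (bq.1.insert vt.1 vt.2, bq.2 ++ [(vt.2, vt.1)]) else bq
    | none => (bq.1.insert vt.1 vt.2, bq.2 ++ [(vt.2, vt.1)])
  else bq

-- the 'while queue' loop; fuel is only a termination bound (proved sufficient below)
def pvReachLoop (adj : PySem.Dict Int (List (Int × Int))) :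
    Nat → PySem.Dict Int Int → List (Int × Int) → PySem.Dict Int Int
  | 0, best, _ => best
  | fuel + 1, best, queue =>
    match pvPopMin queue with
    | none => best
    | some ((tarr, u), q) =>
      let skip := match best.get? u with | some bu => decide (tarr > bu) | none => false
      if skip then pvReachLoop adj fuel best q
      else
        let r := (adj.getD u []).foldl (pvStepA tarr) (best, q)
        pvReachLoop adj fuel r.1 r.2

def pvFuelA (edges : List (Int × Int × Int)) : Nat :=
  2 * ((2 * edges.length + 1) * (edges.length + 1)) + 2

def pvTemporalReachFrom (source : Int) (adj : PySem.Dict Int (List (Int × Int)))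
    (fuel : Nat) : PySem.Dict Int Int :=
  pvReachLoop adj fuel ((PySem.Dict.empty).insert source (-1)) [(-1, source)]

-- 'for s in range(n)' with early return False
def pvOuterA (n : Int) (adj : PySem.Dict Int (List (Int × Int))) (fuel : Nat) :
    Nat → Int → Bool
  | 0, _ => true
  | it + 1, s =>
    if s < n then
      if ((pvTemporalReachFrom s adj fuel).size : Int) < n then false
      else pvOuterA n adj fuel it (s + 1)
    else true

def is_fully_reachable (k : Int) (edges : List (Int × Int × Int)) : Bool :=
  let adj := pvBuildAdj edges
  let n := 2 * k
  pvOuterA n adj (pvFuelA edges) n.toNat 0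

-- ===== PORT B =====
-- one relaxation direction: if a is reached by time t, arrive at v at time t
def pvHalf (b : PySem.Dict Int Int) (a v t : Int) : PySem.Dict Int Int × Bool :=
  match b.get? a with
  | none => (b, false)
  | some ba =>
    if ba ≤ t then
      match b.get? v with
      | none => (b.insert v t, true)
      | some bv => if t < bv then (b.insert v t, true) else (b, false)
    else (b, false)

def pvStepB (st : PySem.Dict Int Int × Bool) (e : Int × Int × Int) :
    PySem.Dict Int Int × Bool :=
  let r1 := pvHalf st.1 e.1 e.2.1 e.2.2
  let r2 := pvHalf r1.1 e.2.1 e.1 e.2.2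
  (r2.1, st.2 || r1.2 || r2.2)

-- one 'for (a, b, t) in edges' relaxation pass, with its changed flag
def pvPassB (edges : List (Int × Int × Int)) (best : PySem.Dict Int Int) :
    PySem.Dict Int Int × Bool :=
  edges.foldl pvStepB (best, false)

-- 'while changed' loop; fuel is only a termination bound (proved sufficient below)
def pvLoopB (edges : List (Int × Int × Int)) :
    Nat → PySem.Dict Int Int → PySem.Dict Int Int
  | 0, best => best
  | fuel + 1, best =>
    let r := pvPassB edges best
    if r.2 then pvLoopB edges fuel r.1 else r.1

def pvFuelB (edges : List (Int × Int × Int)) : Nat :=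
  (2 * edges.length + 1) * (edges.length + 1) + 1

def pvSourceB (edges : List (Int × Int × Int)) (s : Int) : PySem.Dict Int Int :=
  pvLoopB edges (pvFuelB edges) ((PySem.Dict.empty).insert s (-1))

def pvOuterB (n : Int) (edges : List (Int × Int × Int)) : Nat → Int → Bool
  | 0, _ => true
  | it + 1, s =>
    if s < n then
      if ((pvSourceB edges s).size : Int) < n then false
      else pvOuterB n edges it (s + 1)
    else true

def is_fully_reachable_alt (k : Int) (edges : List (Int × Int × Int)) : Bool :=
  let n := 2 * k
  pvOuterB n edges n.toNat 0

-- ===== PRECONDITION & SPEC =====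
def Spec_is_fully_reachable (k : Int) (edges : List (Int × Int × Int)) (out : Bool) : Prop := out = is_fully_reachable_alt k edges
instance (k : Int) (edges : List (Int × Int × Int)) (out : Bool) : Decidable (Spec_is_fully_reachable k edges out) := by unfold Spec_is_fully_reachable; infer_instance

-- ===== CLAIM (what is proved, stated in full; the proofs are below) =====
def Claim_equal_is_fully_reachable : Prop := ∀ (k : Int) (edges : List (Int × Int × Int)), Dom_is_fully_reachable k edges → Spec_is_fully_reachable k edges (is_fully_reachable k edges)

-- ===== LEMMAS AND PROOFS =====

-- undirected temporal edge
def pvEd (edges : List (Int × Int × Int)) (u v t : Int) : Prop :=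
  (u, v, t) ∈ edges ∨ (v, u, t) ∈ edges

-- temporal reachability: arrive at v at time t from s with nondecreasing timestamps
inductive pvRA (edges : List (Int × Int × Int)) (s : Int) : Int → Int → Prop
  | base : pvRA edges s s (-1)
  | step {u t v t' : Int} : pvRA edges s u t → pvEd edges u v t' → t ≤ t' → pvRA edges s v t'

def pvHolds (best : PySem.Dict Int Int) (v t : Int) : Prop :=
  ∃ b, best.get? v = some b ∧ b ≤ t

def pvSound (edges : List (Int × Int × Int)) (s : Int) (best : PySem.Dict Int Int) : Prop :=
  ∀ v b, best.get? v = some b → pvRA edges s v b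

def pvClosedAt (edges : List (Int × Int × Int)) (best : PySem.Dict Int Int) (v bv : Int) : Prop :=
  ∀ w t', pvEd edges v w t' → bv ≤ t' → pvHolds best w t'

def pvGood (edges : List (Int × Int × Int)) (s : Int) (best : PySem.Dict Int Int) : Prop :=
  pvSound edges s best ∧ (∀ u bu, best.get? u = some bu → pvClosedAt edges best u bu) ∧
    pvHolds best s (-1) ∧ best.keys.Nodup

def pvTs (edges : List (Int × Int × Int)) : List Int := edges.map (fun e => e.2.2)
def pvNd (edges : List (Int × Int × Int)) (s : Int) : List Int :=
  s :: edges.flatMap (fun e => [e.1, e.2.1])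

def pvRank (ts : List Int) : Option Int → Nat
  | none => ts.length + 1
  | some t => (ts.filter (fun x => decide (x < t))).length

def pvSig (edges : List (Int × Int × Int)) (s : Int) (best : PySem.Dict Int Int) : Nat :=
  ((pvNd edges s).map (fun v => pvRank (pvTs edges) (best.get? v))).sum

lemma pvRank_le (ts : List Int) (o : Option Int) : pvRank ts o ≤ ts.length + 1 := by
  cases o with
  | none => simp [pvRank]
  | some t => simp [pvRank]; exact le_trans (List.length_filter_le _ _) (Nat.le_succ _)

lemma pvRank_lt (ts : List Int) (t' : Int) (o : Option Int) (ht : t' ∈ ts)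
    (h : o = none ∨ ∃ b, o = some b ∧ t' < b) : pvRank ts (some t') < pvRank ts o := by
  
  rcases h with rfl | ⟨bb, rfl, hlt⟩
  · have := List.length_filter_le (fun x => decide (x < t')) ts
    simp [pvRank]; omega
  · simp only [pvRank]
    induction ts with
    | nil => cases ht
    | cons x xs ih =>
      rcases List.mem_cons.1 ht with hx | hmem
      · subst hx
        have hmono : (xs.filter (fun y => decide (y < t'))).length ≤
            (xs.filter (fun y => decide (y < bb))).length := by
          apply List.Sublist.length_le
          apply List.monotone_filter_right
          intro a ha
          simp only [decide_eq_true_eq] at ha ⊢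
          omega
        simp only [List.filter_cons]
        have h2 : ¬ (t' < t') := lt_irrefl t'
        simp [hlt]
        omega
      · have := ih hmem
        simp only [List.filter_cons]
        by_cases h1 : x < t'
        · have h2 : x < bb := lt_trans h1 hlt
          simp [h1, h2]; omega
        · by_cases h2 : x < bb <;> simp [h1, h2] <;> omega

lemma pvEd_mem_nd (edges : List (Int × Int × Int)) (s u v t : Int) (h : pvEd edges u v t) :
    u ∈ pvNd edges s ∧ v ∈ pvNd edges s ∧ t ∈ pvTs edges := by
  
  refine ⟨?_, ?_, ?_⟩ <;>
  · rcases h with h | h <;>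
    simp only [pvNd, pvTs, List.mem_cons, List.mem_flatMap, List.mem_map] <;>
    first
      | (right; exact ⟨_, h, by simp⟩)
      | (exact ⟨_, h, rfl⟩)

lemma pvSig_insert_lt (edges : List (Int × Int × Int)) (s : Int) (b : PySem.Dict Int Int)
    (v t' : Int) (hv : v ∈ pvNd edges s) (ht : t' ∈ pvTs edges)
    (h : b.get? v = none ∨ ∃ bv, b.get? v = some bv ∧ t' < bv) :
    pvSig edges s (b.insert v t') < pvSig edges s b := by
  
  unfold pvSig
  apply List.sum_lt_sum
  · intro w _
    rw [PySem.Dict.get?_insert]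
    split
    · next hw =>
      subst hw
      exact le_of_lt (pvRank_lt _ _ _ ht h)
    · exact le_refl _
  · refine ⟨v, hv, ?_⟩
    rw [PySem.Dict.get?_insert_self]
    exact pvRank_lt _ _ _ ht h

lemma pvHolds_mono_insert (b : PySem.Dict Int Int) (v t' : Int)
    (h : b.get? v = none ∨ ∃ bv, b.get? v = some bv ∧ t' < bv) :
    ∀ w t, pvHolds b w t → pvHolds (b.insert v t') w t := by
  
  rintro w t ⟨bw, hbw, hle⟩
  by_cases hwv : w = v
  · subst hwv
    rcases h with h | ⟨bv, hbv, hlt⟩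
    · rw [h] at hbw; cases hbw
    · rw [hbv] at hbw
      injection hbw with he
      subst he
      exact ⟨t', PySem.Dict.get?_insert_self _ _ _, le_trans (le_of_lt hlt) hle⟩
  · exact ⟨bw, by rw [PySem.Dict.get?_insert_of_ne _ _ hwv]; exact hbw, hle⟩

lemma pvPopMin_isSome (x : Int × Int) (xs : List (Int × Int)) :
    (pvPopMin (x :: xs)).isSome = true := by
  simp only [pvPopMin]
  cases pvPopMin xs with
  | none => rfl
  | some p =>
    obtain ⟨m, r⟩ := p
    by_cases h : pvLexLe x m = true <;> simp [h]

lemma pvPopMin_none (l : List (Int × Int)) : pvPopMin l = none ↔ l = [] := by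
  cases l with
  | nil => simp [pvPopMin]
  | cons x xs =>
    constructor
    · intro h
      have := pvPopMin_isSome x xs
      rw [h] at this
      cases this
    · intro h; exact absurd h (by simp)

lemma pvPopMin_spec (l r : List (Int × Int)) (m : Int × Int) (h : pvPopMin l = some (m, r)) :
    m ∈ l ∧ r.length + 1 = l.length ∧ (∀ y ∈ r, y ∈ l) ∧ (∀ y ∈ l, y = m ∨ y ∈ r) := by
  induction l generalizing m r with
  | nil => simp [pvPopMin] at h
  | cons x xs ih =>
    cases hx : pvPopMin xs with
    | none =>
      have hnil : xs = [] := (pvPopMin_none xs).1 hx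
      subst hnil
      simp only [pvPopMin, Option.some.injEq, Prod.mk.injEq] at h
      obtain ⟨h1, h2⟩ := h
      subst h1
      subst h2
      refine ⟨List.mem_cons_self, by simp, by simp, ?_⟩
      intro y hy
      simp only [List.mem_cons, List.not_mem_nil, or_false] at hy
      exact Or.inl hy
    | some p =>
      obtain ⟨m', r'⟩ := p
      simp only [pvPopMin, hx] at h
      by_cases hc : pvLexLe x m' = true
      · rw [if_pos hc] at h
        simp only [Option.some.injEq, Prod.mk.injEq] at h
        obtain ⟨h1, h2⟩ := h
        subst h1
        subst h2
        refine ⟨List.mem_cons_self, by simp, fun y hy => List.mem_cons_of_mem _ hy, ?_⟩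
        intro y hy
        rcases List.mem_cons.1 hy with h | h
        · exact Or.inl h
        · exact Or.inr h
      · rw [if_neg hc] at h
        simp only [Option.some.injEq, Prod.mk.injEq] at h
        obtain ⟨h1, h2⟩ := h
        subst h1
        subst h2
        obtain ⟨hm, hlen, hsub, htot⟩ := ih _ _ hx
        refine ⟨List.mem_cons_of_mem _ hm, by simp; omega, ?_, ?_⟩
        · intro y hy
          rcases List.mem_cons.1 hy with rfl | hy
          · exact List.mem_cons_self
          · exact List.mem_cons_of_mem _ (hsub y hy)
        · intro y hy
          rcases List.mem_cons.1 hy with rfl | hy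
          · exact Or.inr List.mem_cons_self
          · rcases htot y hy with h | h
            · exact Or.inl h
            · exact Or.inr (List.mem_cons_of_mem _ h)

lemma pvFoldA (edges : List (Int × Int × Int)) (s u tarr : Int) :
    ∀ (L : List (Int × Int)) (best : PySem.Dict Int Int) (q : List (Int × Int)),
    (∀ p ∈ L, pvEd edges u p.1 p.2) →
    best.get? u = some tarr →
    best.keys.Nodup →
    pvSound edges s best →
    (∀ p ∈ q, pvHolds best p.2 p.1) →
    ((L.foldl (pvStepA tarr) (best, q)).1.keys.Nodup ∧
     pvSound edges s (L.foldl (pvStepA tarr) (best, q)).1 ∧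
     (L.foldl (pvStepA tarr) (best, q)).1.get? u = some tarr ∧
     (∀ w t, pvHolds best w t → pvHolds (L.foldl (pvStepA tarr) (best, q)).1 w t) ∧
     (∀ p ∈ q, p ∈ (L.foldl (pvStepA tarr) (best, q)).2) ∧
     (∀ p ∈ (L.foldl (pvStepA tarr) (best, q)).2,
        pvHolds (L.foldl (pvStepA tarr) (best, q)).1 p.2 p.1) ∧
     (∀ v bv, (L.foldl (pvStepA tarr) (best, q)).1.get? v = some bv →
        (bv, v) ∈ (L.foldl (pvStepA tarr) (best, q)).2 ∨ best.get? v = some bv) ∧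
     (∀ p ∈ L, tarr ≤ p.2 → pvHolds (L.foldl (pvStepA tarr) (best, q)).1 p.1 p.2) ∧
     2 * pvSig edges s (L.foldl (pvStepA tarr) (best, q)).1 +
        (L.foldl (pvStepA tarr) (best, q)).2.length ≤ 2 * pvSig edges s best + q.length) := by
  
  intro L
  induction L with
  | nil =>
    intro best q hL hu hnd hs hq
    refine ⟨hnd, hs, hu, fun w t h => h, fun p hp => hp, hq, fun v bv h => Or.inr h,
      ?_, le_refl _⟩
    intro p hp
    cases hp
  | cons p tl ih =>
    intro best q hL hu hnd hs hq
    simp only [List.foldl_cons]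
    by_cases hge : p.2 ≥ tarr
    · have hedp : pvEd edges u p.1 p.2 := hL p List.mem_cons_self
      have hmemnd := pvEd_mem_nd edges s u p.1 p.2 hedp
      cases hcase : best.get? p.1 with
      | none =>
        have hne : p.1 ≠ u := fun h => by rw [h, hu] at hcase; cases hcase
        have hstep : pvStepA tarr (best, q) p =
            (best.insert p.1 p.2, q ++ [(p.2, p.1)]) := by simp [pvStepA, hge, hcase]
        rw [hstep]
        have hupd : best.get? p.1 = none ∨ ∃ bv, best.get? p.1 = some bv ∧ p.2 < bv :=
          Or.inl hcase
        have hmono := pvHolds_mono_insert best p.1 p.2 hupd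
        have hu' : (best.insert p.1 p.2).get? u = some tarr := by
          rw [PySem.Dict.get?_insert_of_ne _ _ (Ne.symm hne)]
          exact hu
        have hs' : pvSound edges s (best.insert p.1 p.2) := by
          intro w bw hw
          rw [PySem.Dict.get?_insert] at hw
          split at hw
          · next hwv =>
            subst hwv
            injection hw with hw
            subst hw
            exact pvRA.step (hs u tarr hu) hedp hge
          · exact hs w bw hw
        have hq' : ∀ p' ∈ q ++ [(p.2, p.1)], pvHolds (best.insert p.1 p.2) p'.2 p'.1 := by
          intro p' hp'
          rcases List.mem_append.1 hp' with hp' | hp'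
          · exact hmono _ _ (hq p' hp')
          · simp only [List.mem_singleton] at hp'
            subst hp'
            exact ⟨p.2, PySem.Dict.get?_insert_self _ _ _, le_refl _⟩
        obtain ⟨c1, c2, c3, c4, c5, c6, c7, c8, c9⟩ :=
          ih (best.insert p.1 p.2) (q ++ [(p.2, p.1)])
            (fun p' hp' => hL p' (List.mem_cons_of_mem _ hp')) hu'
            (PySem.Dict.nodup_keys_insert _ _ _ hnd) hs' hq'
        have hsig := pvSig_insert_lt edges s best p.1 p.2 hmemnd.2.1 hmemnd.2.2 hupd
        refine ⟨c1, c2, c3, fun w t h => c4 w t (hmono w t h), ?_, c6, ?_, ?_, ?_⟩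
        · intro p' hp'
          exact c5 p' (List.mem_append.2 (Or.inl hp'))
        · intro v bv hv
          rcases c7 v bv hv with h | h
          · exact Or.inl h
          · by_cases hvp : v = p.1
            · subst hvp
              rw [PySem.Dict.get?_insert_self] at h
              injection h with h
              subst h
              exact Or.inl (c5 (p.2, p.1) (by simp))
            · rw [PySem.Dict.get?_insert_of_ne _ _ hvp] at h
              exact Or.inr h
        · intro p' hp' hta
          rcases List.mem_cons.1 hp' with rfl | hp'
          · exact c4 _ _ ⟨p'.2, PySem.Dict.get?_insert_self _ _ _, le_refl _⟩
          · exact c8 p' hp' hta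
        · have hlen : (q ++ [(p.2, p.1)]).length = q.length + 1 := by simp
          omega
      | some bv =>
        by_cases hlt : p.2 < bv
        · have hne : p.1 ≠ u := by
            intro h
            rw [h, hu] at hcase
            injection hcase with hcase
            omega
          have hstep : pvStepA tarr (best, q) p =
              (best.insert p.1 p.2, q ++ [(p.2, p.1)]) := by simp [pvStepA, hge, hcase, hlt]
          rw [hstep]
          have hupd : best.get? p.1 = none ∨ ∃ bv', best.get? p.1 = some bv' ∧ p.2 < bv' :=
            Or.inr ⟨bv, hcase, hlt⟩
          have hmono := pvHolds_mono_insert best p.1 p.2 hupd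
          have hu' : (best.insert p.1 p.2).get? u = some tarr := by
            rw [PySem.Dict.get?_insert_of_ne _ _ (Ne.symm hne)]
            exact hu
          have hs' : pvSound edges s (best.insert p.1 p.2) := by
            intro w bw hw
            rw [PySem.Dict.get?_insert] at hw
            split at hw
            · next hwv =>
              subst hwv
              injection hw with hw
              subst hw
              exact pvRA.step (hs u tarr hu) hedp hge
            · exact hs w bw hw
          have hq' : ∀ p' ∈ q ++ [(p.2, p.1)], pvHolds (best.insert p.1 p.2) p'.2 p'.1 := by
            intro p' hp'
            rcases List.mem_append.1 hp' with hp' | hp'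
            · exact hmono _ _ (hq p' hp')
            · simp only [List.mem_singleton] at hp'
              subst hp'
              exact ⟨p.2, PySem.Dict.get?_insert_self _ _ _, le_refl _⟩
          obtain ⟨c1, c2, c3, c4, c5, c6, c7, c8, c9⟩ :=
            ih (best.insert p.1 p.2) (q ++ [(p.2, p.1)])
              (fun p' hp' => hL p' (List.mem_cons_of_mem _ hp')) hu'
              (PySem.Dict.nodup_keys_insert _ _ _ hnd) hs' hq'
          have hsig := pvSig_insert_lt edges s best p.1 p.2 hmemnd.2.1 hmemnd.2.2 hupd
          refine ⟨c1, c2, c3, fun w t h => c4 w t (hmono w t h), ?_, c6, ?_, ?_, ?_⟩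
          · intro p' hp'
            exact c5 p' (List.mem_append.2 (Or.inl hp'))
          · intro v bv' hv
            rcases c7 v bv' hv with h | h
            · exact Or.inl h
            · by_cases hvp : v = p.1
              · subst hvp
                rw [PySem.Dict.get?_insert_self] at h
                injection h with h
                subst h
                exact Or.inl (c5 (p.2, p.1) (by simp))
              · rw [PySem.Dict.get?_insert_of_ne _ _ hvp] at h
                exact Or.inr h
          · intro p' hp' hta
            rcases List.mem_cons.1 hp' with rfl | hp'
            · exact c4 _ _ ⟨p'.2, PySem.Dict.get?_insert_self _ _ _, le_refl _⟩
            · exact c8 p' hp' hta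
          · have hlen : (q ++ [(p.2, p.1)]).length = q.length + 1 := by simp
            omega
        · have hstep : pvStepA tarr (best, q) p = (best, q) := by
            simp [pvStepA, hge, hcase, hlt]
          rw [hstep]
          obtain ⟨c1, c2, c3, c4, c5, c6, c7, c8, c9⟩ :=
            ih best q (fun p' hp' => hL p' (List.mem_cons_of_mem _ hp')) hu hnd hs hq
          refine ⟨c1, c2, c3, c4, c5, c6, c7, ?_, c9⟩
          intro p' hp' hta
          rcases List.mem_cons.1 hp' with rfl | hp'
          · exact c4 _ _ ⟨bv, hcase, by omega⟩
          · exact c8 p' hp' hta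
    · have hstep : pvStepA tarr (best, q) p = (best, q) := by simp [pvStepA, hge]
      rw [hstep]
      obtain ⟨c1, c2, c3, c4, c5, c6, c7, c8, c9⟩ :=
        ih best q (fun p' hp' => hL p' (List.mem_cons_of_mem _ hp')) hu hnd hs hq
      refine ⟨c1, c2, c3, c4, c5, c6, c7, ?_, c9⟩
      intro p' hp' hta
      rcases List.mem_cons.1 hp' with rfl | hp'
      · exact (hge hta).elim
      · exact c8 p' hp' hta

lemma pvLoopA_good (edges : List (Int × Int × Int)) (s : Int)
    (adj : PySem.Dict Int (List (Int × Int)))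
    (hadj : ∀ u v t, ((v, t) ∈ adj.getD u []) ↔ pvEd edges u v t) :
    ∀ (fuel : Nat) (best : PySem.Dict Int Int) (queue : List (Int × Int)),
    best.keys.Nodup → pvSound edges s best → pvHolds best s (-1) →
    (∀ p ∈ queue, pvHolds best p.2 p.1) →
    (∀ v bv, best.get? v = some bv → (bv, v) ∈ queue ∨ pvClosedAt edges best v bv) →
    2 * pvSig edges s best + queue.length < fuel →
    pvGood edges s (pvReachLoop adj fuel best queue) := by
  
  intro fuel
  induction fuel with
  | zero => intro best queue _ _ _ _ _ hphi; omega
  | succ fuel ih =>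
    intro best queue hnd hs hh hq hqi hphi
    cases hpop : pvPopMin queue with
    | none =>
      have hqe : queue = [] := (pvPopMin_none queue).1 hpop
      subst hqe
      have hred : pvReachLoop adj (fuel + 1) best [] = best := by
        simp only [pvReachLoop]
        rw [hpop]
      rw [hred]
      refine ⟨hs, ?_, hh, hnd⟩
      intro u bu hu
      exact (hqi u bu hu).resolve_left (fun hmem => by cases hmem)
    | some pr =>
      obtain ⟨⟨tarr, u⟩, q⟩ := pr
      obtain ⟨hmem, hlen, hsub, htot⟩ := pvPopMin_spec queue q (tarr, u) hpop
      obtain ⟨bu, hbu, hbule⟩ := hq (tarr, u) hmem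
      by_cases hskip : tarr > bu
      · have hred : pvReachLoop adj (fuel + 1) best queue = pvReachLoop adj fuel best q := by
          simp only [pvReachLoop]
          rw [hpop]
          simp [hbu, hskip]
        rw [hred]
        apply ih best q hnd hs hh (fun p hp => hq p (hsub p hp)) ?_ (by omega)
        intro v bv hv
        rcases hqi v bv hv with hw | hc
        · left
          rcases htot (bv, v) hw with heq | hinq
          · exfalso
            have h1 : bv = tarr := congrArg Prod.fst heq
            have h2 : v = u := congrArg Prod.snd heq
            subst h2
            rw [hbu] at hv
            injection hv with hv
            omega
          · exact hinq
        · exact Or.inr hc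
      · have hbt : bu = tarr := by omega
        subst hbt
        have hred : pvReachLoop adj (fuel + 1) best queue =
            pvReachLoop adj fuel ((adj.getD u []).foldl (pvStepA bu) (best, q)).1
              ((adj.getD u []).foldl (pvStepA bu) (best, q)).2 := by
          simp only [pvReachLoop]
          rw [hpop]
          simp [hbu]
        rw [hred]
        obtain ⟨c1, c2, c3, c4, c5, c6, c7, c8, c9⟩ :=
          pvFoldA edges s u bu (adj.getD u []) best q
            (fun p hp => (hadj u p.1 p.2).1 hp) hbu hnd hs (fun p hp => hq p (hsub p hp))
        apply ih _ _ c1 c2 (c4 s (-1) hh) c6 ?_ (by omega)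
        intro v bv hv
        rcases c7 v bv hv with h | hold
        · exact Or.inl h
        · rcases hqi v bv hold with hw | hc
          · rcases htot (bv, v) hw with heq | hinq
            · have h1 : bv = bu := congrArg Prod.fst heq
              have h2 : v = u := congrArg Prod.snd heq
              subst h2
              subst h1
              right
              intro w t' hed hle
              exact c8 (w, t') ((hadj v w t').2 hed) hle
            · exact Or.inl (c5 _ hinq)
          · right
            intro w t' hed hle
            exact c4 _ _ (hc w t' hed hle)

lemma pvHalf_spec (edges : List (Int × Int × Int)) (s : Int) (b : PySem.Dict Int Int)
    (a v t : Int) (hed : pvEd edges a v t) (hnd : b.keys.Nodup) (hs : pvSound edges s b) :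
    ((pvHalf b a v t).1.keys.Nodup ∧ pvSound edges s (pvHalf b a v t).1 ∧
     (∀ w tt, pvHolds b w tt → pvHolds (pvHalf b a v t).1 w tt) ∧
     pvSig edges s (pvHalf b a v t).1 ≤ pvSig edges s b ∧
     ((pvHalf b a v t).2 = true → pvSig edges s (pvHalf b a v t).1 < pvSig edges s b) ∧
     ((pvHalf b a v t).2 = false → (pvHalf b a v t).1 = b ∧
        (∀ ba, b.get? a = some ba → ba ≤ t → pvHolds b v t))) := by
  
  have hmem := pvEd_mem_nd edges s a v t hed
  cases hga : b.get? a with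
  | none =>
    have he : pvHalf b a v t = (b, false) := by simp [pvHalf, hga]
    rw [he]
    exact ⟨hnd, hs, fun w tt h => h, le_refl _, by simp,
      fun _ => ⟨rfl, fun ba hba _ => by cases hba⟩⟩
  | some ba =>
    by_cases hble : ba ≤ t
    · cases hgv : b.get? v with
      | none =>
        have he : pvHalf b a v t = (b.insert v t, true) := by simp [pvHalf, hga, hble, hgv]
        rw [he]
        have hupd : b.get? v = none ∨ ∃ bv, b.get? v = some bv ∧ t < bv := Or.inl hgv
        have hsnd : pvSound edges s (b.insert v t) := by
          intro w bw hw
          rw [PySem.Dict.get?_insert] at hw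
          split at hw
          · next hwv =>
            subst hwv
            injection hw with hw
            subst hw
            exact pvRA.step (hs a ba hga) hed hble
          · exact hs w bw hw
        exact ⟨PySem.Dict.nodup_keys_insert _ _ _ hnd, hsnd, pvHolds_mono_insert b v t hupd,
          le_of_lt (pvSig_insert_lt edges s b v t hmem.2.1 hmem.2.2 hupd),
          fun _ => pvSig_insert_lt edges s b v t hmem.2.1 hmem.2.2 hupd,
          fun hf => by cases hf⟩
      | some bv =>
        by_cases hlt : t < bv
        · have he : pvHalf b a v t = (b.insert v t, true) := by
            simp [pvHalf, hga, hble, hgv, hlt]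
          rw [he]
          have hupd : b.get? v = none ∨ ∃ bv', b.get? v = some bv' ∧ t < bv' :=
            Or.inr ⟨bv, hgv, hlt⟩
          have hsnd : pvSound edges s (b.insert v t) := by
            intro w bw hw
            rw [PySem.Dict.get?_insert] at hw
            split at hw
            · next hwv =>
              subst hwv
              injection hw with hw
              subst hw
              exact pvRA.step (hs a ba hga) hed hble
            · exact hs w bw hw
          exact ⟨PySem.Dict.nodup_keys_insert _ _ _ hnd, hsnd, pvHolds_mono_insert b v t hupd,
            le_of_lt (pvSig_insert_lt edges s b v t hmem.2.1 hmem.2.2 hupd),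
            fun _ => pvSig_insert_lt edges s b v t hmem.2.1 hmem.2.2 hupd,
            fun hf => by cases hf⟩
        · have he : pvHalf b a v t = (b, false) := by simp [pvHalf, hga, hble, hgv, hlt]
          rw [he]
          exact ⟨hnd, hs, fun w tt h => h, le_refl _, by simp,
            fun _ => ⟨rfl, fun ba' _ _ => ⟨bv, hgv, by omega⟩⟩⟩
    · have he : pvHalf b a v t = (b, false) := by simp [pvHalf, hga, hble]
      rw [he]
      refine ⟨hnd, hs, fun w tt h => h, le_refl _, by simp, fun _ => ⟨rfl, ?_⟩⟩
      intro ba' hba' hle'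
      injection hba' with hh
      subst hh
      exact absurd hle' hble

lemma pvPassB_fold (edges : List (Int × Int × Int)) (s : Int) :
    ∀ (L : List (Int × Int × Int)) (b : PySem.Dict Int Int) (ch : Bool),
    (∀ e ∈ L, e ∈ edges) → b.keys.Nodup → pvSound edges s b →
    ((L.foldl pvStepB (b, ch)).1.keys.Nodup ∧
     pvSound edges s (L.foldl pvStepB (b, ch)).1 ∧
     (∀ w t, pvHolds b w t → pvHolds (L.foldl pvStepB (b, ch)).1 w t) ∧
     pvSig edges s (L.foldl pvStepB (b, ch)).1 ≤ pvSig edges s b ∧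
     ((L.foldl pvStepB (b, ch)).2 = true → ch = true ∨
        pvSig edges s (L.foldl pvStepB (b, ch)).1 < pvSig edges s b) ∧
     ((L.foldl pvStepB (b, ch)).2 = false → ch = false ∧ (L.foldl pvStepB (b, ch)).1 = b ∧
        ∀ e ∈ L, ((∀ ba, b.get? e.1 = some ba → ba ≤ e.2.2 → pvHolds b e.2.1 e.2.2) ∧
                  (∀ bb, b.get? e.2.1 = some bb → bb ≤ e.2.2 → pvHolds b e.1 e.2.2)))) := by
  
  intro L
  induction L with
  | nil =>
    intro b ch _ hnd hs
    exact ⟨hnd, hs, fun w t h => h, le_refl _, fun h => Or.inl h,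
      fun h => ⟨h, rfl, fun e he => by cases he⟩⟩
  | cons e tl ih =>
    intro b ch hL hnd hs
    simp only [List.foldl_cons]
    have he : e ∈ edges := hL e List.mem_cons_self
    have hed1 : pvEd edges e.1 e.2.1 e.2.2 := Or.inl he
    have hed2 : pvEd edges e.2.1 e.1 e.2.2 := Or.inr he
    obtain ⟨a1, a2, a3, a4, a5, a6⟩ := pvHalf_spec edges s b e.1 e.2.1 e.2.2 hed1 hnd hs
    obtain ⟨b1, b2, b3, b4, b5, b6⟩ :=
      pvHalf_spec edges s (pvHalf b e.1 e.2.1 e.2.2).1 e.2.1 e.1 e.2.2 hed2 a1 a2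
    have hstep : pvStepB (b, ch) e =
        ((pvHalf (pvHalf b e.1 e.2.1 e.2.2).1 e.2.1 e.1 e.2.2).1,
         ch || (pvHalf b e.1 e.2.1 e.2.2).2 ||
           (pvHalf (pvHalf b e.1 e.2.1 e.2.2).1 e.2.1 e.1 e.2.2).2) := rfl
    rw [hstep]
    obtain ⟨c1, c2, c3, c4, c5, c6⟩ :=
      ih (pvHalf (pvHalf b e.1 e.2.1 e.2.2).1 e.2.1 e.1 e.2.2).1
        (ch || (pvHalf b e.1 e.2.1 e.2.2).2 ||
          (pvHalf (pvHalf b e.1 e.2.1 e.2.2).1 e.2.1 e.1 e.2.2).2)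
        (fun e' he' => hL e' (List.mem_cons_of_mem _ he')) b1 b2
    refine ⟨c1, c2, ?_, le_trans c4 (le_trans b4 a4), ?_, ?_⟩
    · intro w tt h
      exact c3 w tt (b3 w tt (a3 w tt h))
    · intro htrue
      rcases c5 htrue with hch | hlt
      · by_cases hch0 : ch = true
        · exact Or.inl hch0
        · right
          have hch' : ch = false := by
            cases ch
            · rfl
            · exact absurd rfl hch0
          subst hch'
          simp only [Bool.false_or, Bool.or_eq_true] at hch
          rcases hch with h1 | h2
          · exact lt_of_le_of_lt c4 (lt_of_le_of_lt b4 (a5 h1))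
          · exact lt_of_le_of_lt c4 (lt_of_lt_of_le (b5 h2) a4)
      · exact Or.inr (lt_of_lt_of_le hlt (le_trans b4 a4))
    · intro hfalse
      obtain ⟨hch, heq, hcl⟩ := c6 hfalse
      simp only [Bool.or_eq_false_iff] at hch
      obtain ⟨⟨hch0, hr1f⟩, hr2f⟩ := hch
      obtain ⟨he1, hcl1⟩ := a6 hr1f
      obtain ⟨he2, hcl2⟩ := b6 hr2f
      refine ⟨hch0, by rw [heq, he2, he1], ?_⟩
      intro e' he'
      rcases List.mem_cons.1 he' with rfl | he'
      · refine ⟨hcl1, ?_⟩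
        intro bb hbb hleb
        have := hcl2 bb (by rw [he1]; exact hbb) hleb
        rw [he1] at this
        exact this
      · have := hcl e' he'
        rw [he2, he1] at this
        exact this

lemma pvLoopB_good (edges : List (Int × Int × Int)) (s : Int) :
    ∀ (fuel : Nat) (b : PySem.Dict Int Int),
    b.keys.Nodup → pvSound edges s b → pvHolds b s (-1) →
    pvSig edges s b < fuel → pvGood edges s (pvLoopB edges fuel b) := by
  
  intro fuel
  induction fuel with
  | zero => intro b _ _ _ h; omega
  | succ fuel ih =>
    intro b hnd hs hh hsig
    have hun : pvLoopB edges (fuel + 1) b =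
        if (pvPassB edges b).2 then pvLoopB edges fuel (pvPassB edges b).1
        else (pvPassB edges b).1 := rfl
    rw [hun]
    have hP : pvPassB edges b = edges.foldl pvStepB (b, false) := rfl
    obtain ⟨c1, c2, c3, c4, c5, c6⟩ :=
      pvPassB_fold edges s edges b false (fun e he => he) hnd hs
    rw [← hP] at c1 c2 c3 c4 c5 c6
    by_cases hch : (pvPassB edges b).2 = true
    · rw [if_pos hch]
      apply ih _ c1 c2 (c3 s (-1) hh)
      rcases c5 hch with h | h
      · cases h
      · omega
    · rw [if_neg (by simpa using hch)]
      obtain ⟨_, heq, hclose⟩ := c6 (by simpa using hch)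
      rw [heq]
      refine ⟨hs, ?_, hh, hnd⟩
      intro u bu hu w t' hed hle
      rcases hed with h | h
      · exact (hclose _ h).1 bu hu hle
      · exact (hclose _ h).2 bu hu hle

lemma pvGood_holds (edges : List (Int × Int × Int)) (s : Int) (best : PySem.Dict Int Int)
    (hg : pvGood edges s best) : ∀ v t, pvRA edges s v t → pvHolds best v t := by
  intro v t h
  induction h with
  | base => exact hg.2.2.1
  | @step u tu w t' _ hed hle ih =>
    obtain ⟨bu, hbu, hble⟩ := ih
    exact hg.2.1 u bu hbu w t' hed (le_trans hble hle)

lemma pvGood_size_eq (edges : List (Int × Int × Int)) (s : Int)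
    (b1 b2 : PySem.Dict Int Int) (h1 : pvGood edges s b1) (h2 : pvGood edges s b2) :
    b1.size = b2.size := by
  
  have key : ∀ b : PySem.Dict Int Int, pvGood edges s b →
      ∀ v, v ∈ b.keys ↔ ∃ t, pvRA edges s v t := by
    intro b hb v
    constructor
    · intro hv
      cases h : b.get? v with
      | none => exact absurd ((PySem.Dict.get?_eq_none_iff_not_mem_keys b v).1 h) (by simp [hv])
      | some bb => exact ⟨bb, hb.1 v bb h⟩
    · rintro ⟨t, hra⟩
      obtain ⟨bv, hbv, _⟩ := pvGood_holds edges s b hb v t hra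
      by_contra hv
      rw [(PySem.Dict.get?_eq_none_iff_not_mem_keys b v).2 hv] at hbv
      cases hbv
  have hperm : b1.keys.Perm b2.keys :=
    (List.perm_ext_iff_of_nodup h1.2.2.2 h2.2.2.2).2
      (fun a => (key b1 h1 a).trans ((key b2 h2 a).symm))
  have hlen := hperm.length_eq
  simpa [PySem.Dict.size, PySem.Dict.keys] using hlen

lemma pvBuildAdjAux (L : List (Int × Int × Int)) :
    ∀ (d : PySem.Dict Int (List (Int × Int))) (u : Int),
    (L.foldl (fun d e =>
      let d1 := d.insert e.1 (d.getD e.1 [] ++ [(e.2.1, e.2.2)])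
      d1.insert e.2.1 (d1.getD e.2.1 [] ++ [(e.1, e.2.2)])) d).getD u [] =
    d.getD u [] ++ L.flatMap (fun e => (if e.1 = u then [(e.2.1, e.2.2)] else []) ++
                                       (if e.2.1 = u then [(e.1, e.2.2)] else [])) := by
  induction L with
  | nil => intro d u; simp
  | cons e t ih =>
    intro d u
    rw [List.foldl_cons, ih]
    simp only [List.flatMap_cons, ← List.append_assoc]
    congr 1
    clear ih
    simp only [PySem.Dict.getD_insert]
    by_cases h2 : u = e.2.1
    · rw [if_pos h2]
      by_cases h1 : u = e.1
      · rw [if_pos (h2.symm.trans h1), if_pos h1.symm, if_pos h2.symm, ← h1]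
      · rw [if_neg (fun h => h1 (h2.trans h)), if_neg (fun h => h1 h.symm),
          if_pos h2.symm, ← h2]
        simp
    · rw [if_neg h2]
      by_cases h1 : u = e.1
      · rw [if_pos h1, if_pos h1.symm, if_neg (fun h => h2 h.symm), ← h1]
        simp
      · rw [if_neg h1, if_neg (fun h => h1 h.symm), if_neg (fun h => h2 h.symm)]
        simp

lemma pvBuildAdj_getD (edges : List (Int × Int × Int)) :
    ∀ u, (pvBuildAdj edges).getD u [] =
      edges.flatMap (fun e => (if e.1 = u then [(e.2.1, e.2.2)] else []) ++
                              (if e.2.1 = u then [(e.1, e.2.2)] else [])) := by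
  
  intro u
  unfold pvBuildAdj
  rw [pvBuildAdjAux]
  simp

lemma pvAdj_mem (edges : List (Int × Int × Int)) (u v t : Int) :
    ((v, t) ∈ (pvBuildAdj edges).getD u []) ↔ pvEd edges u v t := by
  
  rw [pvBuildAdj_getD]
  constructor
  · intro h
    simp only [List.mem_flatMap, List.mem_append] at h
    obtain ⟨e, he, hm⟩ := h
    obtain ⟨a, b, tt⟩ := e
    rcases hm with hm | hm
    · by_cases ha : a = u
      · subst ha
        rw [if_pos rfl] at hm
        simp only [List.mem_singleton, Prod.mk.injEq] at hm
        obtain ⟨rfl, rfl⟩ := hm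
        exact Or.inl he
      · simp [ha] at hm
    · by_cases hb : b = u
      · subst hb
        rw [if_pos rfl] at hm
        simp only [List.mem_singleton, Prod.mk.injEq] at hm
        obtain ⟨rfl, rfl⟩ := hm
        exact Or.inr he
      · simp [hb] at hm
  · intro h
    simp only [List.mem_flatMap, List.mem_append]
    rcases h with h | h
    · exact ⟨(u, v, t), h, by simp⟩
    · exact ⟨(v, u, t), h, by simp⟩

lemma pvInit_good (s : Int) :
    ((PySem.Dict.empty : PySem.Dict Int Int).insert s (-1)).keys.Nodup ∧
    (∀ edges, pvSound edges s ((PySem.Dict.empty).insert s (-1))) ∧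
    pvHolds ((PySem.Dict.empty).insert s (-1)) s (-1) := by
  
  refine ⟨PySem.Dict.nodup_keys_insert _ _ _ PySem.Dict.nodup_keys_empty, ?_, ?_⟩
  · intro edges v b h
    rw [PySem.Dict.get?_insert] at h
    split at h
    · next hv =>
      subst hv
      injection h with h
      subst h
      exact pvRA.base
    · rw [PySem.Dict.get?_empty] at h; cases h
  · exact ⟨-1, PySem.Dict.get?_insert_self _ _ _, le_refl _⟩

lemma pvSig_init_le (edges : List (Int × Int × Int)) (s : Int) :
    pvSig edges s ((PySem.Dict.empty).insert s (-1)) ≤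
      (2 * edges.length + 1) * (edges.length + 1) := by
  
  have hlen2 : ∀ (l : List (Int × Int × Int)),
      (l.flatMap (fun e => ([e.1, e.2.1] : List Int))).length = 2 * l.length := by
    intro l
    induction l with
    | nil => simp
    | cons x xs ih => simp [ih]; omega
  have hndlen : (pvNd edges s).length = 2 * edges.length + 1 := by
    simp [pvNd, hlen2]
  unfold pvSig
  have hb : ∀ x ∈ (pvNd edges s).map
      (fun v => pvRank (pvTs edges) (((PySem.Dict.empty).insert s (-1)).get? v)),
      x ≤ edges.length + 1 := by
    intro x hx
    obtain ⟨v, _, rfl⟩ := List.mem_map.1 hx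
    have := pvRank_le (pvTs edges) (((PySem.Dict.empty).insert s (-1)).get? v)
    simpa [pvTs] using this
  calc ((pvNd edges s).map _).sum
      ≤ ((pvNd edges s).map (fun v => pvRank (pvTs edges)
          (((PySem.Dict.empty).insert s (-1)).get? v))).length • (edges.length + 1) :=
        List.sum_le_card_nsmul _ _ hb
    _ = (2 * edges.length + 1) * (edges.length + 1) := by
        rw [List.length_map, hndlen, smul_eq_mul]

lemma pvSource_size_eq (edges : List (Int × Int × Int)) (s : Int) :
    (pvTemporalReachFrom s (pvBuildAdj edges) (pvFuelA edges)).size = (pvSourceB edges s).size := by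
  
  have hM := pvSig_init_le edges s
  obtain ⟨hnd0, hs0, hh0⟩ := pvInit_good s
  apply pvGood_size_eq edges s
  · unfold pvTemporalReachFrom
    apply pvLoopA_good edges s (pvBuildAdj edges) (fun u v t => pvAdj_mem edges u v t)
      (pvFuelA edges) _ _ hnd0 (hs0 edges) hh0 ?_ ?_ ?_
    · intro p hp
      simp only [List.mem_singleton] at hp
      subst hp
      exact hh0
    · intro v bv hv
      rw [PySem.Dict.get?_insert] at hv
      split at hv
      · next hvs =>
        subst hvs
        injection hv with hv
        subst hv
        left
        simp
      · rw [PySem.Dict.get?_empty] at hv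
        cases hv
    · unfold pvFuelA
      simp only [List.length_singleton]
      omega
  · unfold pvSourceB
    apply pvLoopB_good edges s (pvFuelB edges) _ hnd0 (hs0 edges) hh0
    unfold pvFuelB
    omega

lemma pvOuter_eq (edges : List (Int × Int × Int)) (n : Int) :
    ∀ (it : Nat) (s : Int),
      pvOuterA n (pvBuildAdj edges) (pvFuelA edges) it s = pvOuterB n edges it s := by
  intro it
  induction it with
  | zero => intro s; rfl
  | succ it ih =>
    intro s
    simp only [pvOuterA, pvOuterB, pvSource_size_eq edges s, ih]

-- ===== VERDICT (by name: the statement is the Claim_ definition above) =====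
theorem is_fully_reachable_spec : Claim_equal_is_fully_reachable := by
  intro k edges _
  unfold Spec_is_fully_reachable is_fully_reachable is_fully_reachable_alt
  simp only []
  exact pvOuter_eq edges (2 * k) (2 * k).toNat 0
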